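-- pv_equiv track=rewrite | github.com/ysl-lab/CP_tutorial | 2_production/Py_write_bemeta_phiPpsiP.py | read_gro
-- ===== SOURCE A (Python) =====
-- def read_gro(lines):
--    num_res=0
--    resids=[]
--    residues=[]
--    atoms=[]
--    indexes=[]
--    for l in range(len(lines)):
--       if l != 0 and l != 1:
--          if l < (len(lines)-1):
--             if int(lines[l].strip().split()[0][0]) > num_res: num_res=int(lines[l].strip().split()[0][0])
--             resids.append(int(lines[l].strip().split()[0][0]))
--             residues.append(str(lines[l].strip().split()[0][1:]))
--             atoms.append(str(lines[l].strip().split()[1]))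
--             indexes.append(int(lines[l].strip().split()[2]))
--          else:  # box line
--             break
--    #print num_res,resids,residues,atoms,indexes
--    return num_res,resids,residues,atoms,indexes
-- ===== SOURCE B (Python) =====
-- def read_gro(lines):
--     rows = []
--     for line in lines[2:-1]:
--         f = line.split()
--         rows.append((int(f[0][0]), f[0][1:], f[1], int(f[2])))
--     if rows:
--         resids, residues, atoms, indexes = (list(t) for t in zip(*rows))
--     else:
--         resids, residues, atoms, indexes = [], [], [], []
--     return max(resids, default=0), resids, residues, atoms, indexes
-- ===== Notes on version B (the rewrite author's own statement) =====
-- stated objective: simpler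
-- what changed: Replaces A's index loop over range(len(lines)) (with skip-conditions for lines 0/1, a break at the box line, a running max and five parallel accumulators, re-splitting each line five times) by one pass over the data slice lines[2:-1] that splits each line once into a row tuple, a zip(*rows) transpose into the four column lists, and max(resids, default=0) as a separate reduction.
import Mathlib
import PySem

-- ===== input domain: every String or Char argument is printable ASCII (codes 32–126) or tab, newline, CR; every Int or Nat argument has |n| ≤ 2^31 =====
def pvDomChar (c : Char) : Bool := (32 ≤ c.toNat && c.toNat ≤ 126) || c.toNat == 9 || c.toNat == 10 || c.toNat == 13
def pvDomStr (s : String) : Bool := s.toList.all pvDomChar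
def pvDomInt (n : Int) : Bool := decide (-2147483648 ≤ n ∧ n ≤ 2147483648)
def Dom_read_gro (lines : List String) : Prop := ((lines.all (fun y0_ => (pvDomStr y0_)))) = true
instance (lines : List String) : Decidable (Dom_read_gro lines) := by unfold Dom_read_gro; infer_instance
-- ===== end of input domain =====

-- B replaces A's index loop (with its running max, break at the box line and five parallel
-- accumulators, re-splitting each line five times) by one pass over the data slice building
-- row tuples, a transpose into the four columns, and max(resids, default=0); objective: simpler.

-- ===== PORT A =====
-- A re-evaluates lines[l].strip().split() at each use; this helper is that expression.
def pvFieldsA (lines : List String) (l : Int) : List String :=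
  PySem.Str.split₀ (PySem.Str.strip (PySem.List.pyGetD lines l ""))

-- int(lines[l].strip().split()[0][0]); getD defaults sit exactly где Python raises (outside Pre_).
def pvResidA (lines : List String) (l : Int) : Int :=
  (PySem.Int.ofStr? (String.ofList (((pvFieldsA lines l).getD 0 "").toList.take 1))).getD 0

def read_gro_loop (lines : List String) (ls : List Int) (num_res : Int) (resids : List Int)
    (residues atoms : List String) (indexes : List Int) :
    Int × List Int × List String × List String × List Int :=
  match ls with
  | [] => (num_res, resids, residues, atoms, indexes)
  | l :: rest =>
    if l ≠ 0 ∧ l ≠ 1 then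
      if l < PySem.List.len lines - 1 then
        read_gro_loop lines rest
          (if pvResidA lines l > num_res then pvResidA lines l else num_res)
          (resids ++ [pvResidA lines l])
          (residues ++ [PySem.Str.slice ((pvFieldsA lines l).getD 0 "") (some 1) none])
          (atoms ++ [(pvFieldsA lines l).getD 1 ""])
          (indexes ++ [(PySem.Int.ofStr? ((pvFieldsA lines l).getD 2 "")).getD 0])
      else (num_res, resids, residues, atoms, indexes)   -- box line: break
    else read_gro_loop lines rest num_res resids residues atoms indexes

def read_gro (lines : List String) : Int × List Int × List String × List String × List Int :=
  read_gro_loop lines (PySem.List.pyRange 0 (PySem.List.len lines) 1) 0 [] [] [] []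

-- ===== PORT B =====
-- one row (resid, residue, atom, index) of a data line
def pvRowB (line : String) : Int × String × String × Int :=
  let f := PySem.Str.split₀ (PySem.Str.strip line)
  let f0 := f.getD 0 ""
  ((PySem.Int.ofStr? (String.ofList (f0.toList.take 1))).getD 0,
   PySem.Str.slice f0 (some 1) none,
   f.getD 1 "",
   (PySem.Int.ofStr? (f.getD 2 "")).getD 0)

def read_gro_alt (lines : List String) : Int × List Int × List String × List String × List Int :=
  let rows := (PySem.List.slice lines (some 2) (some (-1))).map pvRowB
  let resids := rows.map (·.1)
  (PySem.List.maxD resids (fun x => x) 0,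
   resids, rows.map (·.2.1), rows.map (·.2.2.1), rows.map (·.2.2.2))

-- ===== PRECONDITION & SPEC =====
-- Pre_ = exactly the inputs where Python A returns normally: every data line (lines[2:-1]) parses.
-- Each data line (the slice lines[2:-1]) must have ≥ 3 whitespace fields, a first field whose
-- first character parses as a (nonnegative, single-digit) int, and an int third field — exactly
-- the shape on which Python's int()/indexing in A does not raise.
def Pre_read_gro (lines : List String) : Prop :=
  ∀ line ∈ PySem.List.slice lines (some 2) (some (-1)),
    3 ≤ (PySem.Str.split₀ (PySem.Str.strip line)).length ∧
    0 ≤ (PySem.Int.ofStr?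
          (String.ofList (((PySem.Str.split₀ (PySem.Str.strip line)).getD 0 "").toList.take 1))).getD (-1) ∧
    ((PySem.Int.ofStr? ((PySem.Str.split₀ (PySem.Str.strip line)).getD 2 "")).isSome = true)
instance (lines : List String) : Decidable (Pre_read_gro lines) := by
  unfold Pre_read_gro; infer_instance

def pvWitness_read_gro : List String :=
  ["title", "4", "1ALA CA 1 0.1 0.2", "2ALA CB 2 0.3 0.4", "10.0 10.0 10.0"]

def Spec_read_gro (lines : List String) (out : Int × List Int × List String × List String × List Int) : Prop := out = read_gro_alt lines
instance (lines : List String) (out : Int × List Int × List String × List String × List Int) : Decidable (Spec_read_gro lines out) := by unfold Spec_read_gro; infer_instance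

-- ===== CLAIM (what is proved, stated in full; the proofs are below) =====
def Claim_equal_read_gro : Prop := ∀ (lines : List String), Dom_read_gro lines → Pre_read_gro lines → Spec_read_gro lines (read_gro lines)

-- ===== LEMMAS AND PROOFS =====

-- the four column functions of a data line (proof-side names for pvRowB's components)
def pvR1 (line : String) : Int :=
  (PySem.Int.ofStr? (String.ofList (((PySem.Str.split₀ (PySem.Str.strip line)).getD 0 "").toList.take 1))).getD 0
def pvR2 (line : String) : String :=
  PySem.Str.slice ((PySem.Str.split₀ (PySem.Str.strip line)).getD 0 "") (some 1) none
def pvR3 (line : String) : String :=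
  (PySem.Str.split₀ (PySem.Str.strip line)).getD 1 ""
def pvR4 (line : String) : Int :=
  (PySem.Int.ofStr? ((PySem.Str.split₀ (PySem.Str.strip line)).getD 2 "")).getD 0

lemma pv_row_split (line : String) :
    pvRowB line = (pvR1 line, pvR2 line, pvR3 line, pvR4 line) := rfl

-- lines[2:-1] as drop/take
lemma pv_slice_two_neg_one {α : Type} (xs : List α) (h : 2 ≤ xs.length) :
    PySem.List.slice xs (some 2) (some (-1)) = (xs.drop 2).take (xs.length - 1 - 2) := by
  have hne : xs ≠ [] := by rintro rfl; simp at h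
  have h1 : ((xs.length : Int) + -1).toNat = xs.length - 1 := by omega
  have h2 : min 2 xs.length = 2 := by omega
  simp [PySem.List.slice, PySem.List.clampIdx, hne, h1, h2]

-- a Pre_-style bound transfers from getD (-1) to the port's getD 0
lemma pv_nonneg_getD (o : Option Int) (h : 0 ≤ o.getD (-1)) : 0 ≤ o.getD 0 := by
  cases o <;> simp_all

-- A's running max from 0 over nonnegative values is Python's max(xs, default=0)
lemma pv_foldmax (xs : List Int) (h : ∀ x ∈ xs, 0 ≤ x) :
    xs.foldl (fun m x => if x > m then x else m) 0 = PySem.List.maxD xs (fun x => x) 0 := by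
  have hfun : (fun (m x : Int) => if x > m then x else m) = (fun m x => max m x) := by
    funext m x
    rcases lt_or_ge m x with hl | hl
    · simp [hl, max_eq_right hl.le]
    · simp [not_lt.mpr hl, max_eq_left hl]
  rw [hfun]
  cases xs with
  | nil => simp [PySem.List.maxD, PySem.List.max?]
  | cons x t =>
    have hx : max 0 x = x := max_eq_right (h x (by simp))
    simp [PySem.List.maxD, PySem.List.max?_id_cons, List.foldl_cons, hx]

-- A's fields expression at a valid index
lemma pv_fields_at (lines : List String) (j : Nat) (hj : j < lines.length) :
    pvFieldsA lines (j : Int) = PySem.Str.split₀ (PySem.Str.strip lines[j]) := by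
  simp [pvFieldsA, PySem.List.pyGetD_natCast, List.getD_eq_getElem?_getD, hj]

-- A's four per-index expressions are the column functions at lines[j]
lemma pv_at1 (lines : List String) (j : Nat) (hj : j < lines.length) :
    pvResidA lines (j : Int) = pvR1 lines[j] := by
  simp only [pvResidA, pvR1, pv_fields_at lines j hj]
lemma pv_at2 (lines : List String) (j : Nat) (hj : j < lines.length) :
    PySem.Str.slice ((pvFieldsA lines (j : Int)).getD 0 "") (some 1) none = pvR2 lines[j] := by
  simp only [pvR2, pv_fields_at lines j hj]
lemma pv_at3 (lines : List String) (j : Nat) (hj : j < lines.length) :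
    (pvFieldsA lines (j : Int)).getD 1 "" = pvR3 lines[j] := by
  simp only [pvR3, pv_fields_at lines j hj]
lemma pv_at4 (lines : List String) (j : Nat) (hj : j < lines.length) :
    (PySem.Int.ofStr? ((pvFieldsA lines (j : Int)).getD 2 "")).getD 0 = pvR4 lines[j] := by
  simp only [pvR4, pv_fields_at lines j hj]

-- A's loop from any index 2 ≤ j collects the columns of lines[j : len-1]
lemma pv_loopA (lines : List String) : ∀ (fuel j : Nat), lines.length - j ≤ fuel → 2 ≤ j →
    ∀ (nr : Int) (rs : List Int) (re ats : List String) (ix : List Int),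
    read_gro_loop lines (PySem.List.pyRange (j : Int) (PySem.List.len lines) 1) nr rs re ats ix =
      ((((lines.drop j).take (lines.length - 1 - j)).map pvR1).foldl
          (fun m x => if x > m then x else m) nr,
       rs ++ ((lines.drop j).take (lines.length - 1 - j)).map pvR1,
       re ++ ((lines.drop j).take (lines.length - 1 - j)).map pvR2,
       ats ++ ((lines.drop j).take (lines.length - 1 - j)).map pvR3,
       ix ++ ((lines.drop j).take (lines.length - 1 - j)).map pvR4) := by
  intro fuel
  induction fuel with
  | zero =>
    intro j hfuel hj nr rs re ats ix
    have hlen : lines.length ≤ j := by omega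
    rw [PySem.List.pyRange_one_eq_nil (by simp; exact_mod_cast hlen)]
    simp [read_gro_loop, List.drop_eq_nil_of_le hlen]
  | succ n ih =>
    intro j hfuel hj nr rs re ats ix
    by_cases hend : lines.length ≤ j
    · rw [PySem.List.pyRange_one_eq_nil (by simp; exact_mod_cast hend)]
      simp [read_gro_loop, List.drop_eq_nil_of_le hend]
    · have hend : j < lines.length := by omega
      rw [PySem.List.pyRange_one_cons (by simp; exact_mod_cast hend)]
      rw [read_gro_loop]
      rw [if_pos (⟨by omega, by omega⟩ : ((j : Int) ≠ 0 ∧ (j : Int) ≠ 1))]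
      by_cases hlast : j < lines.length - 1
      · rw [if_pos (by simp; omega)]
        have hdrop : lines.drop j = lines[j] :: lines.drop (j + 1) :=
          List.drop_eq_getElem_cons hend
        have htake : lines.length - 1 - j = (lines.length - 1 - (j + 1)) + 1 := by omega
        have hcast : ((j : Int) + 1) = ((j + 1 : Nat) : Int) := by push_cast; ring
        rw [pv_at1 lines j hend, pv_at2 lines j hend, pv_at3 lines j hend, pv_at4 lines j hend]
        rw [hcast, ih (j + 1) (by omega) (by omega), hdrop, htake, List.take_succ_cons]
        rw [List.map_cons, List.map_cons, List.map_cons, List.map_cons, List.foldl_cons]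
        rw [List.append_assoc, List.append_assoc, List.append_assoc, List.append_assoc]
        rfl
      · rw [if_neg (by simp; omega)]
        have htake : lines.length - 1 - j = 0 := by omega
        simp [htake]

-- the transpose: projecting the split rows is mapping one column function
lemma pv_col1 : ∀ (ls : List String),
    (ls.map (fun l => (pvR1 l, pvR2 l, pvR3 l, pvR4 l))).map
      (fun x : Int × String × String × Int => x.1) = ls.map pvR1
  | [] => rfl
  | l :: ls => by simp only [List.map_cons, pv_col1 ls]
lemma pv_col2 : ∀ (ls : List String),
    (ls.map (fun l => (pvR1 l, pvR2 l, pvR3 l, pvR4 l))).map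
      (fun x : Int × String × String × Int => x.2.1) = ls.map pvR2
  | [] => rfl
  | l :: ls => by simp only [List.map_cons, pv_col2 ls]
lemma pv_col3 : ∀ (ls : List String),
    (ls.map (fun l => (pvR1 l, pvR2 l, pvR3 l, pvR4 l))).map
      (fun x : Int × String × String × Int => x.2.2.1) = ls.map pvR3
  | [] => rfl
  | l :: ls => by simp only [List.map_cons, pv_col3 ls]
lemma pv_col4 : ∀ (ls : List String),
    (ls.map (fun l => (pvR1 l, pvR2 l, pvR3 l, pvR4 l))).map
      (fun x : Int × String × String × Int => x.2.2.2) = ls.map pvR4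
  | [] => rfl
  | l :: ls => by simp only [List.map_cons, pv_col4 ls]

-- both ports agree on a list with at least the two header lines
lemma pv_main (a b : String) (t : List String)
    (hpre : Pre_read_gro (a :: b :: t)) :
    read_gro (a :: b :: t) = read_gro_alt (a :: b :: t) := by
  have hlen2 : (a :: b :: t).length = t.length + 2 := by simp
  have hdata : PySem.List.slice (a :: b :: t) (some 2) (some (-1))
      = t.take (t.length - 1) := by
    rw [pv_slice_two_neg_one (a :: b :: t) (by simp)]
    simp [hlen2]
  -- A side: peel the two skipped header indices, then the segment lemma at j = 2
  have hrange : PySem.List.pyRange 0 (PySem.List.len (a :: b :: t)) 1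
      = 0 :: 1 :: PySem.List.pyRange ((2 : Nat) : Int) (PySem.List.len (a :: b :: t)) 1 := by
    rw [PySem.List.pyRange_one_cons (by simp only [PySem.List.len_eq, List.length_cons]; push_cast; omega)]
    rw [show ((0 : Int) + 1) = 1 by norm_num]
    rw [PySem.List.pyRange_one_cons (by simp only [PySem.List.len_eq, List.length_cons]; push_cast; omega)]
    norm_num
  have hA : read_gro (a :: b :: t)
      = read_gro_loop (a :: b :: t)
          (PySem.List.pyRange ((2 : Nat) : Int) (PySem.List.len (a :: b :: t)) 1) 0 [] [] [] [] := by
    rw [read_gro, hrange]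
    rw [read_gro_loop, if_neg (by simp), read_gro_loop, if_neg (by simp)]
  rw [hA, pv_loopA (a :: b :: t) ((a :: b :: t).length) 2 (by omega) (by omega)]
  have hseg : ((a :: b :: t).drop 2).take ((a :: b :: t).length - 1 - 2)
      = t.take (t.length - 1) := by simp [hlen2]
  rw [hseg]
  -- B side: rows split into the four column functions
  rw [read_gro_alt]
  simp only [hdata]
  have hmapB : (t.take (t.length - 1)).map pvRowB
      = (t.take (t.length - 1)).map (fun l => (pvR1 l, pvR2 l, pvR3 l, pvR4 l)) :=
    List.map_congr_left (fun l _ => pv_row_split l)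
  rw [hmapB, pv_col1, pv_col2, pv_col3, pv_col4]
  -- the running max is max(resids, default=0)
  have hnonneg : ∀ x ∈ (t.take (t.length - 1)).map pvR1, 0 ≤ x := by
    intro x hx
    simp only [List.mem_map] at hx
    obtain ⟨line, hline, rfl⟩ := hx
    have hok := hpre line (by rw [hdata]; exact hline)
    simp only [pvR1]
    exact pv_nonneg_getD _ hok.2.1
  rw [pv_foldmax _ hnonneg]
  simp

-- ===== VERDICT (by name: the statement is the Claim_ definition above) =====
theorem read_gro_spec : Claim_equal_read_gro := by
  intro lines _hdom hpre
  unfold Spec_read_gro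
  match lines with
  | [] => rfl
  | [a] =>
    rw [read_gro, show PySem.List.len [a] = (1 : Int) by simp,
        PySem.List.pyRange_one_cons (by norm_num)]
    norm_num
    simp [read_gro_loop]
    rfl
  | a :: b :: t => exact pv_main a b t hpre
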